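-- pv_equiv track=rewrite | github.com/everaldoalves/ML-KEM | ML-KEM-Basic/getaZetas.py | precompute_zetas
-- ===== SOURCE A (Python) =====
-- def bit_reverse(n, bits):
--     reversed_n = 0
--     for i in range(bits):
--         if n & (1 << i):
--             reversed_n |= 1 << (bits - 1 - i)
--     return reversed_n
--
-- def precompute_zetas(base, modulus, n):
--     zetas = []
--     length = n // 2
--     for k in range(0, length):
--         index = bit_reverse(k, bits=7)  # Ajustar para 7 bits conforme BitRev7 sugere
--         zeta = pow(base, index, modulus)
--         zetas.append(zeta)
--     return zetas
-- ===== SOURCE B (Python) =====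
-- def bit_reverse(n, bits):
--     reversed_n = 0
--     for i in range(bits):
--         if n & (1 << i):
--             reversed_n |= 1 << (bits - 1 - i)
--     return reversed_n
--
-- def precompute_zetas(base, modulus, n):
--     length = n // 2
--     if length <= 0:
--         return []
--     # one linear table of base^i % modulus for i in 0..127, then pure lookups
--     powers = [1 % modulus]
--     for _ in range(127):
--         powers.append(powers[-1] * base % modulus)
--     return [powers[bit_reverse(k, 7)] for k in range(length)]
-- ===== Notes on version B (the rewrite author's own statement) =====
-- stated objective: faster
-- what changed: B replaces the per-element modular exponentiation pow(base, bitrev7(k), modulus) by a single linear build of the 128-entry table base^i % modulus followed by plain list lookups powers[bit_reverse(k,7)].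
import Mathlib
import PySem

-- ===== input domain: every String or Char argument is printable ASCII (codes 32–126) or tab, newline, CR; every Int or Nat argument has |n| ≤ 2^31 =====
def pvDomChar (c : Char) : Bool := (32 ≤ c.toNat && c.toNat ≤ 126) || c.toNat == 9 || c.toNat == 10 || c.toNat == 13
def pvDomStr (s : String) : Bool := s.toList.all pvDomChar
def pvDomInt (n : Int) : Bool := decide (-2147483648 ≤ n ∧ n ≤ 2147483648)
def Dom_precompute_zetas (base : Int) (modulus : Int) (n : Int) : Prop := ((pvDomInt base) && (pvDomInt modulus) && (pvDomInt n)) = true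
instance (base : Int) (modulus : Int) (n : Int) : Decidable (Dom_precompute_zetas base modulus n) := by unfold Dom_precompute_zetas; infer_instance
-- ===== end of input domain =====

-- B builds the 128-entry power table once and indexes it, instead of calling pow per element (faster by a constant factor).

-- ===== PORT A =====
-- shared helper: both Pythons contain the identical bit_reverse
def bit_reverse (n : Int) (bits : Int) : Int :=
  (PySem.List.pyRange 0 bits 1).foldl
    (fun reversed_n i =>
      if PySem.Int.band n (1 <<< i.toNat) ≠ 0 then
        PySem.Int.bor reversed_n (1 <<< (bits - 1 - i).toNat)
      else reversed_n) 0

-- pow(base, index, modulus) is PySem.Int.powMod; index = bit_reverse k 7 is ≥ 0, so .toNat is exact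
def precompute_zetas (base : Int) (modulus : Int) (n : Int) : List Int :=
  let length := PySem.Int.floordiv n 2
  (PySem.List.pyRange 0 length 1).foldl
    (fun zetas k =>
      let index := bit_reverse k 7
      let zeta := PySem.Int.powMod base index.toNat modulus
      zetas ++ [zeta]) []

-- ===== PORT B =====
-- powers = [1 % modulus]; 127 times: powers.append(powers[-1] * base % modulus)
def pvPowers (base : Int) (modulus : Int) : List Int :=
  (List.range 127).foldl
    (fun powers _ =>
      powers ++ [PySem.Int.mod (PySem.List.pyGetD powers (-1) 0 * base) modulus])
    [PySem.Int.mod 1 modulus]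

def precompute_zetas_alt (base : Int) (modulus : Int) (n : Int) : List Int :=
  let length := PySem.Int.floordiv n 2
  if length ≤ 0 then []
  else
    let powers := pvPowers base modulus
    (PySem.List.pyRange 0 length 1).map
      (fun k => PySem.List.pyGetD powers (bit_reverse k 7) 0)

-- ===== PRECONDITION & SPEC =====
-- Pre_ excludes exactly the inputs where Python A raises: modulus = 0 with a nonempty loop
-- (pow(base, e, 0) is a ValueError); A returns normally everywhere else.
def Pre_precompute_zetas (base : Int) (modulus : Int) (n : Int) : Prop :=
  modulus ≠ 0 ∨ n < 2
instance (base : Int) (modulus : Int) (n : Int) : Decidable (Pre_precompute_zetas base modulus n) := by unfold Pre_precompute_zetas; infer_instance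

def pvWitness_precompute_zetas : Int × Int × Int := (17, 3329, 256)

def Spec_precompute_zetas (base : Int) (modulus : Int) (n : Int) (out : List Int) : Prop := out = precompute_zetas_alt base modulus n
instance (base : Int) (modulus : Int) (n : Int) (out : List Int) : Decidable (Spec_precompute_zetas base modulus n out) := by unfold Spec_precompute_zetas; infer_instance

-- ===== CLAIM (what is proved, stated in full; the proofs are below) =====
def Claim_equal_precompute_zetas : Prop := ∀ (base : Int) (modulus : Int) (n : Int), Dom_precompute_zetas base modulus n → Pre_precompute_zetas base modulus n → Spec_precompute_zetas base modulus n (precompute_zetas base modulus n)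

-- ===== LEMMAS AND PROOFS =====

-- the reversed 7-bit index is always in [0, 128), whatever k is
set_option maxHeartbeats 1000000 in
lemma bitrev_bound (k : Int) : 0 ≤ bit_reverse k 7 ∧ bit_reverse k 7 < 128 := by
  have h7 : PySem.List.pyRange 0 7 1 = [0, 1, 2, 3, 4, 5, 6] := by decide
  unfold bit_reverse
  rw [h7]
  simp only [List.foldl]
  split_ifs <;> decide

-- multiplying a residue and reducing again is the same as reducing the product (Python floor-mod = Int.fmod)
lemma pv_fmod_mul_left (a b m : Int) :
    PySem.Int.mod (PySem.Int.mod a m * b) m = PySem.Int.mod (a * b) m := by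
  show ((a.fmod m) * b).fmod m = (a * b).fmod m
  rw [Int.fmod_def a m]
  have : (a - m * a.fdiv m) * b = a * b - m * (a.fdiv m * b) := by ring
  rw [this, Int.sub_mul_fmod_self_left]

-- the table B builds is exactly [base^i % modulus for i in 0..127]
lemma pvPowers_eq (base m : Int) :
    pvPowers base m = (List.range 128).map (fun i => PySem.Int.mod (base ^ i) m) := by
  have key : ∀ j : Nat,
      (List.range j).foldl
        (fun powers _ =>
          powers ++ [PySem.Int.mod (PySem.List.pyGetD powers (-1) 0 * base) m])
        [PySem.Int.mod 1 m]
      = (List.range (j + 1)).map (fun i => PySem.Int.mod (base ^ i) m) := by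
    intro j
    induction j with
    | zero => simp
    | succ j ih =>
        conv_lhs => rw [List.range_succ]
        rw [List.foldl_append, ih]
        simp only [List.foldl]
        conv_rhs => rw [List.range_succ]
        rw [List.map_append]
        congr 1
        conv_lhs => rw [List.range_succ]
        rw [List.map_append]
        simp only [List.map]
        rw [PySem.List.pyGetD_neg_one_append_singleton, pv_fmod_mul_left, ← pow_succ]
  exact key 127

-- per-element agreement: the table lookup is exactly pow(base, bitrev7(k), modulus)
lemma pv_cell (base m k : Int) :
    PySem.Int.powMod base (bit_reverse k 7).toNat m
      = PySem.List.pyGetD (pvPowers base m) (bit_reverse k 7) 0 := by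
  obtain ⟨h0, h1⟩ := bitrev_bound k
  rw [pvPowers_eq]
  rw [PySem.List.pyGetD_eq_getElem _ _ h0 (by simpa using h1)]
  simp [PySem.Int.powMod]

-- ===== VERDICT (by name: the statement is the Claim_ definition above) =====
theorem precompute_zetas_spec : Claim_equal_precompute_zetas := by
  intro base m n _ _
  unfold Spec_precompute_zetas precompute_zetas precompute_zetas_alt
  simp only []
  rw [PySem.List.foldl_append_singleton_eq_map]
  by_cases hl : PySem.Int.floordiv n 2 ≤ 0
  · rw [if_pos hl, PySem.List.pyRange_one_eq_nil hl, List.map_nil]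
    rfl
  · rw [if_neg hl]
    exact List.map_congr_left (fun k _ => pv_cell base m k)
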